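-- pv_equiv track=rewrite | github.com/tamarin-prover/batch-tamarin | src/tamarin_wrapper/modules/parsers/stderr_parser.py | _extract_context_lines
-- ===== SOURCE A (Python) =====
-- from typing import List, Optional
--
-- def _extract_context_lines(
--     stderr: str, error_patterns: List[str]
-- ) -> List[str]:
--     """
--     Extract relevant context lines around errors.
--
--     Args:
--         stderr: The stderr content
--         error_patterns: List of matched error pattern strings
--
--     Returns:
--         List of context lines around errors
--     """
--     if not error_patterns:
--         # If no specific patterns, return last few lines of stderr
--         lines = stderr.strip().split("\n")
--         return lines[-5:] if len(lines) > 5 else lines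
--
--     context_lines: List[str] = []
--     lines = stderr.split("\n")
--
--     for i, line in enumerate(lines):
--         # Check if this line contains any error pattern
--         line_has_error = any(
--             pattern.lower() in line.lower() for pattern in error_patterns
--         )
--
--         if line_has_error:
--             # Add context: 2 lines before and after the error
--             start = max(0, i - 2)
--             end = min(len(lines), i + 3)
--             context_lines.extend(lines[start:end])
--
--     # Remove duplicates while preserving order
--     seen: set[str] = set()
--     unique_context: List[str] = []
--     for line in context_lines:
--         if line not in seen:
--             seen.add(line)
--             unique_context.append(line)
--
--     return unique_context
-- ===== SOURCE B (Python) =====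
-- from typing import List
--
--
-- def _extract_context_lines(
--     stderr: str, error_patterns: List[str]
-- ) -> List[str]:
--     if not error_patterns:
--         lines = stderr.strip().split("\n")
--         return lines[-5:] if len(lines) > 5 else lines
--
--     lines = stderr.split("\n")
--     n = len(lines)
--
--     # Indices of lines matching any pattern (case-insensitive).
--     patterns = [p.lower() for p in error_patterns]
--     match_idx = [
--         i for i in range(n) if any(p in lines[i].lower() for p in patterns)
--     ]
--
--     # One ordered sweep over all line indices: keep an index if some match's
--     # context window covers it, deduplicating by content on the fly.
--     seen = set()
--     result: List[str] = []
--     for j in range(n):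
--         if any(i - 2 <= j < min(n, i + 3) for i in match_idx):
--             line = lines[j]
--             if line not in seen:
--                 seen.add(line)
--                 result.append(line)
--     return result
-- ===== Notes on version B (the rewrite author's own statement) =====
-- stated objective: alternative
-- what changed: Instead of concatenating a 5-line window per matching line and deduplicating the concatenation afterwards, B computes the matching indices once and makes a single increasing sweep over all line indices, emitting a line when a match window covers its index and its content was not emitted before.
import Mathlib
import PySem

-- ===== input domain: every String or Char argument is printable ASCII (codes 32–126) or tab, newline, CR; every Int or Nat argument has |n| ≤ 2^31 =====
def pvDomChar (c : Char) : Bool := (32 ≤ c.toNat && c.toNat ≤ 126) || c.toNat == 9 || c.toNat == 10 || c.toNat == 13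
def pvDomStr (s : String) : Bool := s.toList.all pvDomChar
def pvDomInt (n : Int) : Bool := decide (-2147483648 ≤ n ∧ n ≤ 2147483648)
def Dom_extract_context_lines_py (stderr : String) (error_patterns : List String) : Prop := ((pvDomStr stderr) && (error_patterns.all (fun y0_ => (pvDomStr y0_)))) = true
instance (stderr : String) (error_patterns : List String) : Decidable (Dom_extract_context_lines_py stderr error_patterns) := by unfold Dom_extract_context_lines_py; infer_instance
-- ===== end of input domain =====

-- B replaces A's per-match window concatenation + afterwards dedup pass by one increasing
-- sweep over all line indices with an inline window-coverage test and content dedup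
-- (alternative decomposition, same exact result).

-- ===== PORT A =====
def extract_context_lines_py (stderr : String) (error_patterns : List String) : List String :=
  if error_patterns = [] then
    let lines := (PySem.Str.split? (PySem.Str.strip stderr) "\n").getD []
    if lines.length > 5 then PySem.List.slice lines (some (-5)) none else lines
  else
    let lines := (PySem.Str.split? stderr "\n").getD []
    let context_lines := (PySem.List.enumerate lines).foldl
      (fun acc p =>
        if error_patterns.any (fun pat => PySem.Str.isIn (PySem.Str.lower pat) (PySem.Str.lower p.2)) then
          acc ++ PySem.List.slice lines (some (max 0 (p.1 - 2))) (some (min (lines.length : Int) (p.1 + 3)))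
        else acc) []
    (context_lines.foldl
      (fun (st : PySem.Set String × List String) line =>
        if PySem.Set.contains st.1 line then st
        else (PySem.Set.add st.1 line, st.2 ++ [line])) (PySem.Set.empty, [])).2

-- ===== PORT B =====
def extract_context_lines_py_alt (stderr : String) (error_patterns : List String) : List String :=
  if error_patterns = [] then
    let lines := (PySem.Str.split? (PySem.Str.strip stderr) "\n").getD []
    if lines.length > 5 then PySem.List.slice lines (some (-5)) none else lines
  else
    let lines := (PySem.Str.split? stderr "\n").getD []
    let n : Int := lines.length
    let patterns := error_patterns.map PySem.Str.lower
    let match_idx := (PySem.List.pyRange 0 n).filter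
      (fun i => patterns.any (fun p => PySem.Str.isIn p (PySem.Str.lower (PySem.List.pyGetD lines i ""))))
    ((PySem.List.pyRange 0 n).foldl
      (fun (st : PySem.Set String × List String) j =>
        -- Python tests 'i - 2 <= j < min(n, i + 3)'
        if match_idx.any (fun i => decide (i - 2 ≤ j) && decide (j < min n (i + 3))) then
          if PySem.Set.contains st.1 (PySem.List.pyGetD lines j "") then st
          else (PySem.Set.add st.1 (PySem.List.pyGetD lines j ""),
                st.2 ++ [PySem.List.pyGetD lines j ""])
        else st) (PySem.Set.empty, [])).2

-- ===== PRECONDITION & SPEC =====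
def Spec_extract_context_lines_py (stderr : String) (error_patterns : List String) (out : List String) : Prop := out = extract_context_lines_py_alt stderr error_patterns
instance (stderr : String) (error_patterns : List String) (out : List String) : Decidable (Spec_extract_context_lines_py stderr error_patterns out) := by unfold Spec_extract_context_lines_py; infer_instance

-- ===== CLAIM (what is proved, stated in full; the proofs are below) =====
def Claim_equal_extract_context_lines_py : Prop := ∀ (stderr : String) (error_patterns : List String), Dom_extract_context_lines_py stderr error_patterns → Spec_extract_context_lines_py stderr error_patterns (extract_context_lines_py stderr error_patterns)

-- ===== LEMMAS AND PROOFS =====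

/-- Seen-set dedup keeping first occurrences, with an explicit seen accumulator. -/
def pvDD {α : Type} [DecidableEq α] (seen : List α) : List α → List α
  | [] => []
  | x :: xs => if x ∈ seen then pvDD seen xs else x :: pvDD (x :: seen) xs

/-- The context window of a match at line `i` (indices), in a file of `n` lines. -/
def pvWin (n i : Int) : List Int := PySem.List.pyRange (max 0 (i - 2)) (min n (i + 3)) 1

lemma mem_pvWin {n i j : Int} : j ∈ pvWin n i ↔ max 0 (i - 2) ≤ j ∧ j < min n (i + 3) := by
  simp [pvWin, PySem.List.mem_pyRange_one]

lemma pvDD_congr {α : Type} [DecidableEq α] :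
    ∀ (xs s t : List α), (∀ a ∈ xs, a ∈ s ↔ a ∈ t) → pvDD s xs = pvDD t xs := by
  intro xs
  induction xs with
  | nil => intro s t h; rfl
  | cons x xs ih =>
    intro s t h
    have hx := h x (List.mem_cons_self)
    by_cases hxs : x ∈ s
    · rw [pvDD, pvDD, if_pos hxs, if_pos (hx.mp hxs)]
      exact ih s t (fun a ha => h a (List.mem_cons_of_mem _ ha))
    · rw [pvDD, pvDD, if_neg hxs, if_neg (fun hc => hxs (hx.mpr hc))]
      refine congrArg _ (ih (x :: s) (x :: t) ?_)
      intro a ha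
      simp only [List.mem_cons]
      rw [h a (List.mem_cons_of_mem _ ha)]

lemma mem_pvDD {α : Type} [DecidableEq α] :
    ∀ (xs s : List α) (a : α), a ∈ pvDD s xs ↔ a ∈ xs ∧ a ∉ s := by
  intro xs
  induction xs with
  | nil => intro s a; simp [pvDD]
  | cons x xs ih =>
    intro s a
    by_cases hxs : x ∈ s
    · rw [pvDD, if_pos hxs, ih]
      constructor
      · rintro ⟨h1, h2⟩; exact ⟨List.mem_cons_of_mem _ h1, h2⟩
      · rintro ⟨h1, h2⟩
        rcases List.mem_cons.mp h1 with rfl | h1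
        · exact absurd hxs h2
        · exact ⟨h1, h2⟩
    · rw [pvDD, if_neg hxs]
      simp only [List.mem_cons, ih]
      by_cases hax : a = x
      · simp [hax, hxs]
      · simp [hax]

lemma pvDD_sublist {α : Type} [DecidableEq α] :
    ∀ (xs s : List α), List.Sublist (pvDD s xs) xs := by
  intro xs
  induction xs with
  | nil => intro s; simp [pvDD]
  | cons x xs ih =>
    intro s
    by_cases hxs : x ∈ s
    · rw [pvDD, if_pos hxs]
      exact (ih s).cons x
    · rw [pvDD, if_neg hxs]
      exact (ih (x :: s)).cons₂ x

lemma nodup_pvDD {α : Type} [DecidableEq α] :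
    ∀ (xs s : List α), (pvDD s xs).Nodup := by
  intro xs
  induction xs with
  | nil => intro s; simp [pvDD]
  | cons x xs ih =>
    intro s
    by_cases hxs : x ∈ s
    · rw [pvDD, if_pos hxs]; exact ih s
    · rw [pvDD, if_neg hxs]
      refine List.nodup_cons.mpr ⟨?_, ih (x :: s)⟩
      intro hc
      exact ((mem_pvDD xs (x :: s) x).mp hc).2 List.mem_cons_self

lemma pvDD_append {α : Type} [DecidableEq α] :
    ∀ (xs ys s : List α), pvDD s (xs ++ ys) = pvDD s xs ++ pvDD (xs ++ s) ys := by
  intro xs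
  induction xs with
  | nil => intro ys s; simp [pvDD]
  | cons x xs ih =>
    intro ys s
    by_cases hxs : x ∈ s
    · rw [List.cons_append, pvDD, if_pos hxs, pvDD, if_pos hxs, ih]
      refine congrArg _ (pvDD_congr ys (xs ++ s) (x :: xs ++ s) ?_)
      intro a _
      simp only [List.cons_append, List.mem_cons, List.mem_append]
      constructor
      · rintro (h | h); exacts [Or.inr (Or.inl h), Or.inr (Or.inr h)]
      · rintro (rfl | h | h); exacts [Or.inr hxs, Or.inl h, Or.inr h]
    · rw [List.cons_append, pvDD, if_neg hxs, pvDD, if_neg hxs, ih, List.cons_append]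
      refine congrArg _ (congrArg _ (pvDD_congr ys (xs ++ x :: s) ((x :: xs) ++ s) ?_))
      intro a _
      simp only [List.cons_append, List.mem_cons, List.mem_append]
      tauto

/-- The seen-set/output pair fold of both ports IS `pvDD`. -/
lemma pv_foldl_dedup :
    ∀ (xs : List String) (s : PySem.Set String) (out : List String),
      (xs.foldl
        (fun (st : PySem.Set String × List String) line =>
          if PySem.Set.contains st.1 line then st
          else (PySem.Set.add st.1 line, st.2 ++ [line])) (s, out)).2
      = out ++ pvDD s xs := by
  intro xs
  induction xs with
  | nil => intro s out; simp [pvDD]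
  | cons x xs ih =>
    intro s out
    by_cases hxs : x ∈ s
    · have hc : PySem.Set.contains s x = true := (PySem.Set.contains_iff s x).mpr hxs
      rw [List.foldl_cons, if_pos hc, ih, pvDD, if_pos hxs]
    · have hc : ¬ PySem.Set.contains s x = true := fun h => hxs ((PySem.Set.contains_iff s x).mp h)
      rw [List.foldl_cons, if_neg hc, ih, pvDD, if_neg hxs]
      have hadd : PySem.Set.add s x = s ++ [x] := by
        simp only [PySem.Set.add]
        rw [if_neg hc]
      rw [hadd, pvDD_congr xs (s ++ [x]) (x :: s) (by intro a _; simp [or_comm]),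
        List.append_assoc, List.singleton_append]

/-- Index dedup before mapping does not change a content dedup. -/
lemma pvDD_map_idx {α β : Type} [DecidableEq α] [DecidableEq β] (f : α → β) :
    ∀ (xs : List α) (si : List α) (sc : List β), (∀ i ∈ si, f i ∈ sc) →
      pvDD sc (xs.map f) = pvDD sc ((pvDD si xs).map f) := by
  intro xs
  induction xs with
  | nil => intro si sc h; simp [pvDD]
  | cons x xs ih =>
    intro si sc h
    by_cases hx : x ∈ si
    · rw [pvDD, if_pos hx, List.map_cons, pvDD, if_pos (h x hx), ih si sc h]
    · rw [pvDD, if_neg hx, List.map_cons, List.map_cons]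
      by_cases hfx : f x ∈ sc
      · rw [pvDD, if_pos hfx, pvDD, if_pos hfx]
        refine ih (x :: si) sc ?_
        intro i hi
        rcases List.mem_cons.mp hi with rfl | hi
        exacts [hfx, h i hi]
      · rw [pvDD, if_neg hfx, pvDD, if_neg hfx]
        refine congrArg _ (ih (x :: si) (f x :: sc) ?_)
        intro i hi
        rcases List.mem_cons.mp hi with rfl | hi
        exacts [List.mem_cons_self, List.mem_cons_of_mem _ (h i hi)]

/-- A slice with in-range natural bounds is a map of the element getter over the index range. -/
lemma pv_map_get_pyRange (L : List String) :
    ∀ (t : Nat) (a b : Int), 0 ≤ a → a ≤ b → b ≤ L.length → (b - a).toNat = t →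
      (PySem.List.pyRange a b 1).map (fun j => PySem.List.pyGetD L j "")
        = PySem.List.slice L (some a) (some b) := by
  intro t
  induction t with
  | zero =>
    intro a b ha hab hb ht
    have hba : b = a := by omega
    subst hba
    rw [PySem.List.pyRange_one_eq_nil le_rfl, PySem.List.slice_toNat L ha ha]
    simp
  | succ t iht =>
    intro a b ha hab hb ht
    have hlt : a < b := by omega
    have haL : a.toNat < L.length := by omega
    rw [PySem.List.pyRange_one_cons hlt, List.map_cons,
      iht (a + 1) b (by omega) (by omega) hb (by omega),
      PySem.List.slice_toNat L ha (by omega), PySem.List.slice_toNat L (by omega) (by omega)]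
    have hd : List.drop a.toNat L = L[a.toNat] :: List.drop (a + 1).toNat L := by
      have e : (a + 1).toNat = a.toNat + 1 := by omega
      rw [e, List.drop_eq_getElem_cons haL]
    rw [hd]
    have htk : b.toNat - a.toNat = (b.toNat - (a + 1).toNat) + 1 := by omega
    rw [htk, List.take_succ_cons]
    congr 1
    rw [PySem.List.pyGetD_of_nonneg _ _ ha, List.getD_eq_getElem L "" haL]

lemma pv_flatMap_if {α β : Type} (p : α → Bool) (f : α → List β) :
    ∀ (l : List α), (l.flatMap fun x => if p x then f x else []) = (l.filter p).flatMap f := by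
  intro l
  induction l with
  | nil => simp
  | cons x xs ih =>
    by_cases hx : p x <;> simp [hx, ih]

lemma pv_sorted_dd_flat (n : Int) :
    ∀ (ms : List Int) (S : List Int),
      ms.Pairwise (· ≤ ·) →
      (∀ i ∈ ms, ∀ j k : Int, max 0 (i - 2) ≤ j → j ≤ k → k ∈ S → j ∈ S) →
      List.Pairwise (· < ·) (pvDD S (ms.flatMap (pvWin n))) := by
  intro ms
  induction ms with
  | nil => intro S _ _; simp [pvDD]
  | cons i rest ih =>
    intro S hms hcl
    have hile : ∀ i' ∈ rest, i ≤ i' := (List.pairwise_cons.mp hms).1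
    have hrest : rest.Pairwise (· ≤ ·) := (List.pairwise_cons.mp hms).2
    rw [List.flatMap_cons, pvDD_append]
    rw [List.pairwise_append]
    refine ⟨?_, ?_, ?_⟩
    · exact List.Pairwise.sublist (pvDD_sublist (pvWin n i) S) (by simp [pvWin, PySem.List.pairwise_lt_pyRange_one])
    · refine ih (pvWin n i ++ S) hrest ?_
      intro i' hi' j k hj hjk hk
      rcases List.mem_append.mp hk with hk | hk
      · have hkw := mem_pvWin.mp hk
        have hle := hile i' hi'
        exact List.mem_append.mpr (Or.inl (mem_pvWin.mpr (by constructor <;> omega)))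
      · exact List.mem_append.mpr (Or.inr (hcl i' (List.mem_cons_of_mem _ hi') j k (by omega) hjk hk))
    · intro a ha b hb
      have haw := mem_pvWin.mp (((mem_pvDD _ _ _).mp ha).1)
      have hb' := (mem_pvDD _ _ _).mp hb
      obtain ⟨i'', hi'', hbw⟩ := List.mem_flatMap.mp hb'.1
      have hbw' := mem_pvWin.mp hbw
      have hble : max 0 (i - 2) ≤ b := by
        have := hile i'' hi''
        omega
      have hbn : ¬ b ∈ pvWin n i := fun hc => hb'.2 (List.mem_append.mpr (Or.inl hc))
      have : ¬ (max 0 (i - 2) ≤ b ∧ b < min n (i + 3)) := fun hc => hbn (mem_pvWin.mpr hc)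
      omega


lemma pv_A_side (L : List String) (M : String → Bool) :
    ((PySem.List.enumerate L).foldl
      (fun acc p => if M p.2 then
          acc ++ PySem.List.slice L (some (max 0 (p.1 - 2))) (some (min (L.length : Int) (p.1 + 3)))
        else acc) [])
    = (((PySem.List.pyRange 0 (L.length : Int)).filter
          (fun j => M (PySem.List.pyGetD L j ""))).flatMap (pvWin (L.length : Int))).map
        (fun k => PySem.List.pyGetD L k "") := by
  rw [PySem.List.enumerate_eq_map_pyRange L "", PySem.List.len_eq, List.foldl_map]
  dsimp only
  rw [PySem.List.foldl_congr_mem (PySem.List.pyRange 0 (L.length : Int))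
    (fun acc j => if M (PySem.List.pyGetD L j "") then
        acc ++ PySem.List.slice L (some (max 0 (j - 2))) (some (min (L.length : Int) (j + 3)))
      else acc)
    (fun acc j => acc ++
      (if M (PySem.List.pyGetD L j "") then
        (pvWin (L.length : Int) j).map (fun k => PySem.List.pyGetD L k "") else []))
    []
    (by
      intro acc j hj
      have hjr := (PySem.List.mem_pyRange_one).mp hj
      by_cases hm : M (PySem.List.pyGetD L j "")
      · simp only [hm, if_pos]
        congr 1
        rw [pvWin, pv_map_get_pyRange L ((min (L.length : Int) (j + 3)) - max 0 (j - 2)).toNat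
          (max 0 (j - 2)) (min (L.length : Int) (j + 3)) (by omega) (by omega) (by omega) rfl]
      · simp [hm])]
  rw [PySem.List.foldl_append_eq_flatMap, List.nil_append,
    pv_flatMap_if (fun j => M (PySem.List.pyGetD L j ""))
      (fun j => (pvWin (L.length : Int) j).map (fun k => PySem.List.pyGetD L k ""))]
  rw [List.map_flatMap]

lemma pv_B_side (L : List String) (cov : Int → Bool) :
    (((PySem.List.pyRange 0 (L.length : Int)).foldl
      (fun (st : PySem.Set String × List String) j =>
        if cov j then
          if PySem.Set.contains st.1 (PySem.List.pyGetD L j "") then st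
          else (PySem.Set.add st.1 (PySem.List.pyGetD L j ""),
                st.2 ++ [PySem.List.pyGetD L j ""])
        else st) (PySem.Set.empty, [])).2)
    = pvDD [] (((PySem.List.pyRange 0 (L.length : Int)).filter cov).map
        (fun k => PySem.List.pyGetD L k "")) := by
  rw [PySem.List.foldl_if_eq_foldl_filter cov
    (fun (st : PySem.Set String × List String) j =>
      if PySem.Set.contains st.1 (PySem.List.pyGetD L j "") then st
      else (PySem.Set.add st.1 (PySem.List.pyGetD L j ""), st.2 ++ [PySem.List.pyGetD L j ""])),
    ← List.foldl_map (f := fun j => PySem.List.pyGetD L j "")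
      (g := fun (st : PySem.Set String × List String) line =>
        if PySem.Set.contains st.1 line then st
        else (PySem.Set.add st.1 line, st.2 ++ [line])),
    pv_foldl_dedup, List.nil_append]
  rfl

/-- Deduping the concatenated windows of an increasing match list gives exactly the
    covered indices, in increasing order. -/
lemma pv_idx (n : Int) (ms : List Int) (hms : ms.Pairwise (· ≤ ·)) :
    pvDD [] (ms.flatMap (pvWin n))
    = (PySem.List.pyRange 0 n).filter
        (fun j => ms.any (fun i => decide (i - 2 ≤ j) && decide (j < min n (i + 3)))) := by
  have h1 : List.Pairwise (· < ·) (pvDD ([] : List Int) (ms.flatMap (pvWin n))) :=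
    pv_sorted_dd_flat n ms [] hms (by simp)
  have h2 : List.Pairwise (· < ·) ((PySem.List.pyRange 0 n).filter
      (fun j => ms.any (fun i => decide (i - 2 ≤ j) && decide (j < min n (i + 3))))) :=
    (PySem.List.pairwise_lt_pyRange_one 0 n).filter _
  have hmem : ∀ a : Int, a ∈ pvDD ([] : List Int) (ms.flatMap (pvWin n)) ↔
      a ∈ (PySem.List.pyRange 0 n).filter
        (fun j => ms.any (fun i => decide (i - 2 ≤ j) && decide (j < min n (i + 3)))) := by
    intro a
    rw [mem_pvDD, List.mem_filter, List.mem_flatMap]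
    simp only [List.not_mem_nil, not_false_iff, and_true, List.any_eq_true,
      Bool.and_eq_true, decide_eq_true_eq, PySem.List.mem_pyRange_one]
    constructor
    · rintro ⟨i, hi, hw⟩
      have hb := mem_pvWin.mp hw
      exact ⟨⟨by omega, by omega⟩, ⟨i, hi, by omega, by omega⟩⟩
    · rintro ⟨⟨ha0, han⟩, ⟨i, hi, h1, h2⟩⟩
      exact ⟨i, hi, mem_pvWin.mpr (by omega)⟩
  have hperm := (List.perm_ext_iff_of_nodup (nodup_pvDD _ _)
    (List.Pairwise.imp (fun h => ne_of_lt h) h2)).mpr hmem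
  exact List.eq_of_perm_of_sorted (fun a b _ _ hab hba => absurd hba (lt_asymm hab)) h1 h2 hperm

lemma pv_main (L pats : List String) :
    (((PySem.List.enumerate L).foldl
      (fun acc p =>
        if pats.any (fun pat => PySem.Str.isIn (PySem.Str.lower pat) (PySem.Str.lower p.2)) then
          acc ++ PySem.List.slice L (some (max 0 (p.1 - 2))) (some (min (L.length : Int) (p.1 + 3)))
        else acc) []).foldl
      (fun (st : PySem.Set String × List String) line =>
        if PySem.Set.contains st.1 line then st
        else (PySem.Set.add st.1 line, st.2 ++ [line])) (PySem.Set.empty, [])).2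
    =
    (((PySem.List.pyRange 0 (L.length : Int)).foldl
      (fun (st : PySem.Set String × List String) j =>
        if ((PySem.List.pyRange 0 (L.length : Int)).filter
            (fun i => (pats.map PySem.Str.lower).any
              (fun p => PySem.Str.isIn p (PySem.Str.lower (PySem.List.pyGetD L i ""))))).any
            (fun i => decide (i - 2 ≤ j) && decide (j < min (L.length : Int) (i + 3))) then
          if PySem.Set.contains st.1 (PySem.List.pyGetD L j "") then st
          else (PySem.Set.add st.1 (PySem.List.pyGetD L j ""),
                st.2 ++ [PySem.List.pyGetD L j ""])
        else st) (PySem.Set.empty, [])).2) := by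
  have hMs : ∀ s : String, (pats.map PySem.Str.lower).any (fun p => PySem.Str.isIn p (PySem.Str.lower s))
      = pats.any (fun pat => PySem.Str.isIn (PySem.Str.lower pat) (PySem.Str.lower s)) := by
    intro s; rw [List.any_map]; rfl
  have hm : ((PySem.List.pyRange 0 (L.length : Int)).filter
        (fun i => (pats.map PySem.Str.lower).any
          (fun p => PySem.Str.isIn p (PySem.Str.lower (PySem.List.pyGetD L i "")))))
      = ((PySem.List.pyRange 0 (L.length : Int)).filter
        (fun i => pats.any (fun pat =>
          PySem.Str.isIn (PySem.Str.lower pat) (PySem.Str.lower (PySem.List.pyGetD L i ""))))) :=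
    List.filter_congr (fun i _ => hMs (PySem.List.pyGetD L i ""))
  rw [pv_A_side L (fun s => pats.any (fun pat => PySem.Str.isIn (PySem.Str.lower pat) (PySem.Str.lower s))),
    pv_foldl_dedup, List.nil_append, hm, pv_B_side]
  set ms := ((PySem.List.pyRange 0 (L.length : Int)).filter
    (fun i => pats.any (fun pat =>
      PySem.Str.isIn (PySem.Str.lower pat) (PySem.Str.lower (PySem.List.pyGetD L i ""))))) with hms
  have hsorted : ms.Pairwise (· ≤ ·) :=
    ((PySem.List.pairwise_lt_pyRange_one 0 (L.length : Int)).filter _).imp le_of_lt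
  have hempty : (PySem.Set.empty : PySem.Set String) = ([] : List String) := rfl
  rw [hempty, pvDD_map_idx (fun k => PySem.List.pyGetD L k "") (ms.flatMap (pvWin (L.length : Int)))
    ([] : List Int) ([] : List String) (by simp), pv_idx (L.length : Int) ms hsorted]

-- ===== VERDICT (by name: the statement is the Claim_ definition above) =====
theorem extract_context_lines_py_spec : Claim_equal_extract_context_lines_py := by
  intro stderr error_patterns _
  by_cases hp : error_patterns = []
  · simp only [Spec_extract_context_lines_py, extract_context_lines_py,
      extract_context_lines_py_alt, if_pos hp]
  · simp only [Spec_extract_context_lines_py, extract_context_lines_py,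
      extract_context_lines_py_alt, if_neg hp]
    have h := (pv_main ((PySem.Str.split? stderr "\n").getD []) error_patterns)
    exact h
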